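-- pv_equiv track=rewrite | github.com/Cado-29/lymphoai-model | main.py | get_class_names
-- ===== SOURCE A (Python) =====
-- CLASS_NAMES = ["Fake", "Real"]
--
-- def get_class_names(metadata):
--     class_to_idx = metadata.get("train_class_to_idx")
--     if not class_to_idx:
--         return CLASS_NAMES
--     ordered_labels = [None] * len(class_to_idx)
--     for label, index in class_to_idx.items():
--         if 0 <= index < len(ordered_labels):
--             ordered_labels[index] = label.capitalize()
--     if any(label is None for label in ordered_labels):
--         return CLASS_NAMES
--     return ordered_labels
-- ===== SOURCE B (Python) =====
-- CLASS_NAMES = ["Fake", "Real"]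
--
--
-- def get_class_names(metadata):
--     class_to_idx = metadata.get("train_class_to_idx")
--     if not class_to_idx:
--         return CLASS_NAMES
--     # sort-then-contiguity-check: order the (label, index) pairs by index and
--     # demand the index column be exactly 0..n-1; any out-of-range, negative or
--     # duplicate index breaks contiguity, exactly the cases where A falls back.
--     pairs = sorted(class_to_idx.items(), key=lambda kv: kv[1])
--     if [index for _, index in pairs] != list(range(len(pairs))):
--         return CLASS_NAMES
--     return [label.capitalize() for label, _ in pairs]
-- ===== Notes on version B (the rewrite author's own statement) =====
-- stated objective: alternative
-- what changed: Replaces A's scatter-fill of a None-initialised slot array followed by a None-scan with sort-then-contiguity-check: sort the (label, index) pairs by index, compare the index column with range(n), and map capitalize over the already-ordered labels; no placeholder array or sentinel exists.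
import Mathlib
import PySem

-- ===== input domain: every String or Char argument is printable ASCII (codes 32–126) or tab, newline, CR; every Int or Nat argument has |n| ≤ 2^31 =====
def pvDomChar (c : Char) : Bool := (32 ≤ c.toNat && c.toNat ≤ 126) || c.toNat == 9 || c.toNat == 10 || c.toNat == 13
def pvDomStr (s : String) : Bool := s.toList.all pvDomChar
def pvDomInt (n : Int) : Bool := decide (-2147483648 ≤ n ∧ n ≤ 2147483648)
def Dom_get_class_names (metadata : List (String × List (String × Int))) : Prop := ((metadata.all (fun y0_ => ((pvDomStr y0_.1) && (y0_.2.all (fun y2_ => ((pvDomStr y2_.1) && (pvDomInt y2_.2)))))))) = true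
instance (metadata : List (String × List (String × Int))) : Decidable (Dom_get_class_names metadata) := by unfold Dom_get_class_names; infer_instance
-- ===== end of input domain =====

-- B replaces A's scatter-into-a-None-slot-array-then-scan by sort-then-contiguity-check:
-- sort the pairs by index, compare the index column with range(n), map capitalize (alternative).

-- ===== PORT A =====
-- A scatters capitalized labels into a None-initialised slot array by index, then scans for leftover Nones.
def CLASS_NAMES : List String := ["Fake", "Real"]

-- str.capitalize, exact on the ASCII domain: first char uppercased, remaining chars lowered
def pyCapitalize (s : String) : String :=
  match s.toList with
  | [] => s
  | c :: rest => String.ofList (PySem.Chars.upperChar c :: PySem.Chars.lower rest)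

def get_class_names (metadata : List (String × List (String × Int))) : List String :=
  match (PySem.Dict.mk metadata).get? "train_class_to_idx" with
  | none => CLASS_NAMES                                  -- key missing: .get returns None, falsy
  | some class_to_idx =>
    if class_to_idx = [] then CLASS_NAMES                -- empty dict is falsy
    else
      let ordered := class_to_idx.foldl
        (fun arr p =>
          if 0 ≤ p.2 ∧ p.2 < (arr.length : Int) then arr.set p.2.toNat (some (pyCapitalize p.1))
          else arr)
        (List.replicate class_to_idx.length (none : Option String))
      if ordered.any (fun l => l.isNone) then CLASS_NAMES
      else ordered.map (fun l => l.getD "")              -- every slot is some here; getD only extracts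

-- ===== PORT B =====
-- B sorts the (label, index) pairs by index, demands the index column be exactly range(n),
-- and maps capitalize over the labels in that order.
def get_class_names_alt (metadata : List (String × List (String × Int))) : List String :=
  match (PySem.Dict.mk metadata).get? "train_class_to_idx" with
  | none => CLASS_NAMES
  | some class_to_idx =>
    if class_to_idx = [] then CLASS_NAMES
    else
      let pairs := PySem.List.sorted class_to_idx (fun kv => kv.2) false
      if pairs.map (fun kv => kv.2) = PySem.List.pyRange 0 (class_to_idx.length : Int) 1
      then pairs.map (fun kv => pyCapitalize kv.1)
      else CLASS_NAMES

-- ===== PRECONDITION & SPEC =====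
def Spec_get_class_names (metadata : List (String × List (String × Int))) (out : List String) : Prop := out = get_class_names_alt metadata
instance (metadata : List (String × List (String × Int))) (out : List String) : Decidable (Spec_get_class_names metadata out) := by unfold Spec_get_class_names; infer_instance

-- ===== CLAIM (what is proved, stated in full; the proofs are below) =====
def Claim_equal_get_class_names : Prop := ∀ (metadata : List (String × List (String × Int))), Dom_get_class_names metadata → Spec_get_class_names metadata (get_class_names metadata)

-- ===== LEMMAS AND PROOFS =====

-- last label written at slot i (the overwriting scatter A performs, stated once)
def lastAt (items : List (String × Int)) (i : Int) : Option String :=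
  items.foldl (fun acc p => if i = p.2 then some p.1 else acc) none

-- A's scatter fold preserves the slot-array length
lemma foldA_length (items : List (String × Int)) (arr : List (Option String)) :
    (items.foldl
      (fun arr p =>
        if 0 ≤ p.2 ∧ p.2 < (arr.length : Int) then arr.set p.2.toNat (some (pyCapitalize p.1))
        else arr) arr).length = arr.length := by
  induction items generalizing arr with
  | nil => rfl
  | cons p items ih =>
    simp only [List.foldl_cons]
    split <;> simp [ih]

-- slot i of A's scatter fold is the last in-range write at i
lemma foldA_getElem? (items : List (String × Int)) (arr : List (Option String)) (i : Nat)
    (hi : i < arr.length) :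
    (items.foldl
      (fun arr p =>
        if 0 ≤ p.2 ∧ p.2 < (arr.length : Int) then arr.set p.2.toNat (some (pyCapitalize p.1))
        else arr) arr)[i]? =
    some (items.foldl (fun acc p => if (i : Int) = p.2 then some (pyCapitalize p.1) else acc)
      (arr.getD i none)) := by
  induction items generalizing arr with
  | nil => simp [List.getD_eq_getElem?_getD, List.getElem?_eq_getElem hi]
  | cons p items ih =>
    simp only [List.foldl_cons]
    by_cases h : 0 ≤ p.2 ∧ p.2 < (arr.length : Int)
    · rw [if_pos h]
      rw [ih _ (by simpa using hi)]
      congr 1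
      by_cases hip : (i : Int) = p.2
      · have : p.2.toNat = i := by omega
        simp [this, hip, List.getD_eq_getElem?_getD, hi]
      · have : p.2.toNat ≠ i := by omega
        simp [List.getD_eq_getElem?_getD, List.getElem?_set_ne this, hip]
    · rw [if_neg h, ih _ hi]
      congr 1
      have hip : ¬ ((i : Int) = p.2) := by omega
      simp [hip]

-- pushing capitalize through the overwriting fold
lemma foldCap (items : List (String × Int)) (i : Int) (b : Option String) :
    items.foldl (fun acc p => if i = p.2 then some (pyCapitalize p.1) else acc) (b.map pyCapitalize) =
    (items.foldl (fun acc p => if i = p.2 then some p.1 else acc) b).map pyCapitalize := by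
  induction items generalizing b with
  | nil => rfl
  | cons p items ih =>
    simp only [List.foldl_cons]
    by_cases h : i = p.2
    · simp only [if_pos h]
      exact ih (some p.1)
    · simp only [if_neg h]
      exact ih b

-- the overwriting fold ignores its accumulator once some pair hits index i
lemma lastAt_acc_irrel (items : List (String × Int)) (i : Int) (hi : i ∈ items.map Prod.snd)
    (b b' : Option String) :
    items.foldl (fun acc p => if i = p.2 then some p.1 else acc) b =
    items.foldl (fun acc p => if i = p.2 then some p.1 else acc) b' := by
  induction items generalizing b b' with
  | nil => simp at hi
  | cons p items ih =>
    simp only [List.foldl_cons]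
    by_cases h : i = p.2
    · simp [h]
    · simp only [if_neg h]
      rcases List.mem_map.mp hi with ⟨q, hq, hq2⟩
      rcases List.mem_cons.mp hq with hq | hq
      · exact absurd (hq ▸ hq2).symm h
      · exact ih (List.mem_map.mpr ⟨q, hq, hq2⟩) b b'

-- if no pair hits index i, the fold returns its accumulator
lemma lastAt_acc_fixed (items : List (String × Int)) (i : Int) (hi : i ∉ items.map Prod.snd)
    (b : Option String) :
    items.foldl (fun acc p => if i = p.2 then some p.1 else acc) b = b := by
  induction items generalizing b with
  | nil => rfl
  | cons p items ih =>
    simp only [List.map_cons, List.mem_cons, not_or] at hi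
    simp only [List.foldl_cons, if_neg hi.1]
    exact ih hi.2 b

-- lastAt hits exactly the indices occurring in the list
lemma lastAt_isSome (items : List (String × Int)) (i : Int) :
    (lastAt items i).isSome = true ↔ i ∈ items.map Prod.snd := by
  constructor
  · intro h
    by_contra hmem
    rw [lastAt, lastAt_acc_fixed items i hmem none] at h
    simp at h
  · intro hmem
    induction items with
    | nil => simp at hmem
    | cons p items ih =>
      simp only [lastAt, List.foldl_cons]
      by_cases hmem' : i ∈ items.map Prod.snd
      · rw [lastAt_acc_irrel items i hmem' _ none]
        exact ih hmem'
      · have h : i = p.2 := by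
          simp only [List.map_cons, List.mem_cons] at hmem
          tauto
        rw [if_pos h, lastAt_acc_fixed items i hmem']
        rfl

-- with pairwise-distinct indices, lastAt returns the unique matching label
lemma lastAt_of_nodup (items : List (String × Int)) (hnd : (items.map Prod.snd).Nodup)
    (p : String × Int) (hp : p ∈ items) : lastAt items p.2 = some p.1 := by
  induction items with
  | nil => simp at hp
  | cons q items ih =>
    simp only [List.map_cons, List.nodup_cons] at hnd
    simp only [lastAt, List.foldl_cons]
    rcases List.mem_cons.mp hp with hp | hp
    · subst hp
      rw [if_pos rfl, lastAt_acc_fixed items p.2 hnd.1]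
    · have hm : p.2 ∈ items.map Prod.snd := List.mem_map.mpr ⟨p, hp, rfl⟩
      rw [lastAt_acc_irrel items p.2 hm _ none]
      exact ih hnd.2 hp

-- abbreviation for the sorted pair list and the Int range 0..n-1
def intRange (n : Nat) : List Int := (List.range n).map (fun k : Nat => (k : Int))

lemma intRange_pairwise_lt (n : Nat) : (intRange n).Pairwise (· < ·) := by
  refine List.pairwise_map.mpr (List.pairwise_lt_range.imp ?_)
  intro a b h
  exact_mod_cast h

-- THE KEY FACT: the sorted index column equals range(n)  ⟺  every slot 0..n-1 gets a write
lemma contiguity_iff (items : List (String × Int)) :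
    ((PySem.List.sorted items (fun kv => kv.2) false).map (fun kv => kv.2) = intRange items.length)
    ↔ ∀ k < items.length, ((lastAt items (k : Int)).isSome = true) := by
  have hperm : ((PySem.List.sorted items (fun kv => kv.2) false).map (fun kv => kv.2)).Perm
      (items.map Prod.snd) := (PySem.List.sorted_perm items (fun kv => kv.2) false).map _
  constructor
  · intro heq k hk
    rw [lastAt_isSome]
    have : (k : Int) ∈ intRange items.length :=
      List.mem_map.mpr ⟨k, List.mem_range.mpr hk, rfl⟩
    exact hperm.mem_iff.mp (heq ▸ this)
  · intro hall
    -- range n is a subpermutation of the index column, and lengths agree: a permutation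
    have hsub : (intRange items.length).Subperm (items.map Prod.snd) := by
      apply List.subperm_of_subset (intRange_pairwise_lt items.length).nodup
      intro x hx
      rcases List.mem_map.mp hx with ⟨k, hk, rfl⟩
      exact (lastAt_isSome items (k : Int)).mp (hall k (List.mem_range.mp hk))
    have hlen : (items.map Prod.snd).length ≤ (intRange items.length).length := by
      simp [intRange]
    have hperm2 : (intRange items.length).Perm (items.map Prod.snd) :=
      hsub.perm_of_length_le hlen
    -- both lists are ≤-sorted and they are permutations of each other: equal
    refine List.Perm.eq_of_pairwise (le := (· ≤ ·)) (fun a b _ _ h1 h2 => le_antisymm h1 h2) ?_ ?_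
      (hperm.trans hperm2.symm)
    · exact List.pairwise_map.mpr (PySem.List.sorted_pairwise items (fun kv => kv.2))
    · exact (intRange_pairwise_lt items.length).imp le_of_lt

-- ===== VERDICT (by name: the statement is the Claim_ definition above) =====
theorem get_class_names_spec : Claim_equal_get_class_names := by
  intro metadata _
  unfold Spec_get_class_names get_class_names get_class_names_alt
  rcases hm : (PySem.Dict.mk metadata).get? "train_class_to_idx" with _ | items
  · rfl
  · by_cases he : items = []
    · simp [he]
    · dsimp only
      rw [if_neg he, if_neg he]
      -- A's slot array, slotwise: slot i holds the capitalized last write at i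
      have hord : items.foldl
          (fun arr p =>
            if 0 ≤ p.2 ∧ p.2 < (arr.length : Int) then arr.set p.2.toNat (some (pyCapitalize p.1))
            else arr)
          (List.replicate items.length (none : Option String))
          = (List.range items.length).map (fun (i : Nat) => (lastAt items (↑i)).map pyCapitalize) := by
        apply List.ext_getElem?
        intro i
        by_cases hi : i < items.length
        · rw [foldA_getElem? items _ i (by simpa using hi)]
          have hgd : (List.replicate items.length (none : Option String)).getD i none = none := by
            simp [List.getD_eq_getElem?_getD]
          have hc := foldCap items (i : Int) none
          simp only [Option.map_none] at hc
          rw [hgd, hc, List.getElem?_map, List.getElem?_range hi]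
          rfl
        · rw [List.getElem?_eq_none (by rw [foldA_length]; simpa using not_lt.mp hi),
              List.getElem?_eq_none (by simpa using not_lt.mp hi)]
      rw [hord]
      have hrange : PySem.List.pyRange 0 (items.length : Int) 1 = intRange items.length :=
        PySem.List.pyRange_zero_nat items.length
      rw [hrange]
      by_cases hcond :
          (PySem.List.sorted items (fun kv => kv.2) false).map (fun kv => kv.2) = intRange items.length
      · rw [if_pos hcond]
        have hall := (contiguity_iff items).mp hcond
        have hnone : ((List.range items.length).map
              (fun (i : Nat) => (lastAt items (↑i)).map pyCapitalize)).any (fun l => l.isNone) = false := by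
          rw [List.any_eq_false]
          intro l hl
          simp only [List.mem_map, List.mem_range] at hl
          rcases hl with ⟨k, hk, rfl⟩
          obtain ⟨v, hv⟩ := Option.isSome_iff_exists.mp (hall k hk)
          simp [hv]
        rw [hnone]
        simp only [Bool.false_eq_true, if_false]
        -- elementwise: sorted[i] has index i and its label is the unique write at i
        have hperm : (PySem.List.sorted items (fun kv => kv.2) false).Perm items :=
          PySem.List.sorted_perm items (fun kv => kv.2) false
        have hlen : (PySem.List.sorted items (fun kv => kv.2) false).length = items.length :=
          hperm.length_eq
        have hnd : (items.map Prod.snd).Nodup := by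
          have h1 : ((PySem.List.sorted items (fun kv => kv.2) false).map (fun kv => kv.2)).Nodup := by
            rw [hcond]; exact (intRange_pairwise_lt items.length).nodup
          exact (hperm.map Prod.snd).nodup_iff.mp h1
        apply List.ext_getElem
        · simp [hlen]
        · intro i h1 h2
          simp only [List.getElem_map, List.getElem_range]
          have hs : i < (PySem.List.sorted items (fun kv => kv.2) false).length := by
            simpa [hlen] using (by simpa using h2)
          have hi' : i < (intRange items.length).length := by
            simpa [intRange] using (by simpa using h2 : i < items.length)
          have hidx : ((PySem.List.sorted items (fun kv => kv.2) false)[i]'hs).2 = (i : Int) := by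
            have := congrArg (fun l => l[i]?) hcond
            simp only [List.getElem?_map] at this
            rw [List.getElem?_eq_getElem hs, List.getElem?_eq_getElem hi'] at this
            simp only [Option.map_some, Option.some_inj] at this
            simpa [intRange] using this
          have hmem : (PySem.List.sorted items (fun kv => kv.2) false)[i]'hs ∈ items :=
            hperm.mem_iff.mp (List.getElem_mem hs)
          have hlast := lastAt_of_nodup items hnd _ hmem
          rw [hidx] at hlast
          rw [hlast]
          rfl
      · rw [if_neg hcond]
        -- contiguity fails: some slot k < n stays None, so A also returns CLASS_NAMES
        have : ¬ ∀ k < items.length, ((lastAt items (k : Int)).isSome = true) :=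
          fun h => hcond ((contiguity_iff items).mpr h)
        push Not at this
        rcases this with ⟨k, hk, hko⟩
        have hnone : ((List.range items.length).map
              (fun (i : Nat) => (lastAt items (↑i)).map pyCapitalize)).any (fun l => l.isNone) = true := by
          rw [List.any_eq_true]
          refine ⟨(lastAt items (↑k)).map pyCapitalize, List.mem_map.mpr ⟨k, by simpa using hk, rfl⟩, ?_⟩
          cases h : lastAt items (↑k) with
          | none => simp
          | some v => rw [h] at hko; simp at hko
        rw [hnone]
        simp
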